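-- pv_equiv track=rewrite | github.com/umutmuratayaz/-PythonCoderbyteChallange | DifferentCases.py | DifferentCases
-- ===== SOURCE A (Python) =====
-- def DifferentCases(strParam):
--
--     list = []
--     strParam2 = ''
--
--     for i in strParam:
--         if i.isalpha() and i != '':
--             strParam2 += i
--         else:
--             strParam2 = strParam2.lower()
--             strParam2 = strParam2.capitalize()
--             list += [strParam2]
--             strParam2 = ''
--
--     strParam2 = strParam2.lower()
--     strParam2 = strParam2.capitalize()
--     list += [strParam2]
--     strParam2 = ''
--     strParam2 = ''.join(list)
--
--     return strParam2
-- ===== SOURCE B (Python) =====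
-- def DifferentCases(strParam):
--     # Single pass, no intermediate word list: emit each alphabetic character
--     # directly, uppercased when it starts a new word, lowercased otherwise.
--     out = []
--     start = True
--     for c in strParam:
--         if c.isalpha():
--             out.append(c.upper() if start else c.lower())
--             start = False
--         else:
--             start = True
--     return ''.join(out)
-- ===== Notes on version B (the rewrite author's own statement) =====
-- stated objective: simpler
-- what changed: Replaces A's build-a-list-of-words-then-lower/capitalize/join pipeline with a single pass that emits each alphabetic character directly, uppercased iff it starts a word (tracked by a boolean flag), skipping non-alpha characters.
import Mathlib
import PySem

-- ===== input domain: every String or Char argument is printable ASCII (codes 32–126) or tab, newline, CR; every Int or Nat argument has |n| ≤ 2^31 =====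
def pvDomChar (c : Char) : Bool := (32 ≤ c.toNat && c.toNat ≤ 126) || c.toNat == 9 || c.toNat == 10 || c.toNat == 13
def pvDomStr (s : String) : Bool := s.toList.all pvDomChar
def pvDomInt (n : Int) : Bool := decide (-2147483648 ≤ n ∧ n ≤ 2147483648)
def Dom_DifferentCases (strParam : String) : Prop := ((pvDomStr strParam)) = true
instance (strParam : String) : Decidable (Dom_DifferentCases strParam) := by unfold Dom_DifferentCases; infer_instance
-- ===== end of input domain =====

-- B replaces A's word-list + lower/capitalize/join pipeline by a single pass with a
-- start-of-word flag, casing each alphabetic character directly (objective: simpler).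


-- ===== PORT A =====
-- str.capitalize(), ported by hand (PySem has no capitalize): first char upper-cased,
-- rest lower-cased; exact on the ASCII domain (ASCII title-case = upper-case).
def pyCapitalize (cs : List Char) : List Char :=
  match cs with
  | [] => []
  | c :: rest => PySem.Chars.upperChar c :: PySem.Chars.lower rest

-- the body of A's for-loop, on state (list, strParam2)
def aStep (st : List (List Char) × List Char) (i : Char) : List (List Char) × List Char :=
  if PySem.Chars.isalpha i = true ∧ ([i] : List Char) ≠ [] then (st.1, st.2 ++ [i])
  else (st.1 ++ [pyCapitalize (PySem.Chars.lower st.2)], [])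

def DifferentCases (strParam : String) : String :=
  let r := strParam.toList.foldl aStep ([], [])
  String.ofList (PySem.Chars.join [] (r.1 ++ [pyCapitalize (PySem.Chars.lower r.2)]))

-- ===== PORT B =====
-- the body of B's for-loop, on state (out, start)
def bStep (st : List Char × Bool) (c : Char) : List Char × Bool :=
  if PySem.Chars.isalpha c = true then
    (st.1 ++ [if st.2 then PySem.Chars.upperChar c else PySem.Chars.lowerChar c], false)
  else (st.1, true)

def DifferentCases_alt (strParam : String) : String :=
  String.ofList (strParam.toList.foldl bStep ([], true)).1

-- ===== PRECONDITION & SPEC =====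
def Spec_DifferentCases (strParam : String) (out : String) : Prop := out = DifferentCases_alt strParam
instance (strParam : String) (out : String) : Decidable (Spec_DifferentCases strParam out) := by unfold Spec_DifferentCases; infer_instance

-- ===== CLAIM (what is proved, stated in full; the proofs are below) =====
def Claim_equal_DifferentCases : Prop := ∀ (strParam : String), Dom_DifferentCases strParam → Spec_DifferentCases strParam (DifferentCases strParam)

-- ===== LEMMAS AND PROOFS =====
theorem toNat_ofNat' (n : Nat) (h : n < 55296) : (Char.ofNat n).toNat = n := by
  have hv : Nat.isValidChar n := Or.inl h
  simp only [Char.ofNat, hv, dite_true, Char.ofNatAux, Char.toNat]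
  exact UInt32.toNat_ofNatLT

theorem char_le_iff (a c : Char) : a ≤ c ↔ a.toNat ≤ c.toNat := by
  rw [Char.le_def]; exact UInt32.le_iff_toNat_le ..

theorem upper_lower (c : Char) :
    PySem.Chars.upperChar (PySem.Chars.lowerChar c) = PySem.Chars.upperChar c := by
  unfold PySem.Chars.lowerChar
  by_cases h : PySem.Chars.isupper c = true
  · simp only [h, if_true]
    have hr : 65 ≤ c.toNat ∧ c.toNat ≤ 90 := by
      simp only [PySem.Chars.isupper, Bool.and_eq_true, decide_eq_true_eq, char_le_iff] at h
      exact h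
    have ht : (Char.ofNat (c.toNat + 32)).toNat = c.toNat + 32 := toNat_ofNat' _ (by omega)
    have ha97 : ('a' : Char).toNat = 97 := rfl
    have hz122 : ('z' : Char).toNat = 122 := rfl
    have hlo : PySem.Chars.islower (Char.ofNat (c.toNat + 32)) = true := by
      simp only [PySem.Chars.islower, Bool.and_eq_true, decide_eq_true_eq, char_le_iff, ht,
        ha97, hz122]
      omega
    have hup : PySem.Chars.islower c = false := by
      simp only [PySem.Chars.islower, char_le_iff]
      simp; omega
    unfold PySem.Chars.upperChar
    simp only [hlo, hup, if_true, ht]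
    have h32 : c.toNat + 32 - 32 = c.toNat := by omega
    rw [h32]
    exact Char.ofNat_toNat c
  · simp [h]

theorem lower_idem (c : Char) :
    PySem.Chars.lowerChar (PySem.Chars.lowerChar c) = PySem.Chars.lowerChar c := by
  unfold PySem.Chars.lowerChar
  by_cases h : PySem.Chars.isupper c = true
  · simp only [h, if_true]
    have hr : 65 ≤ c.toNat ∧ c.toNat ≤ 90 := by
      simp only [PySem.Chars.isupper, Bool.and_eq_true, decide_eq_true_eq, char_le_iff] at h
      exact h
    have ht : (Char.ofNat (c.toNat + 32)).toNat = c.toNat + 32 := toNat_ofNat' _ (by omega)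
    have hnu : PySem.Chars.isupper (Char.ofNat (c.toNat + 32)) = false := by
      simp only [PySem.Chars.isupper, char_le_iff, ht]
      simp; omega
    simp [hnu]
  · simp [h]

theorem join_nil_eq_flatten (l : List (List Char)) : PySem.Chars.join [] l = l.flatten := by
  unfold PySem.Chars.join
  induction l with
  | nil => rfl
  | cons a t ih =>
    cases t with
    | nil => simp [List.intercalate]
    | cons b r =>
      simp only [List.intercalate, List.intersperse] at ih ⊢
      simp_all

-- cap∘lower over a word extended by one character
theorem capLower_append (w : List Char) (c : Char) :
    pyCapitalize (PySem.Chars.lower (w ++ [c])) =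
      pyCapitalize (PySem.Chars.lower w)
        ++ [if w = [] then PySem.Chars.upperChar c else PySem.Chars.lowerChar c] := by
  cases w with
  | nil => simp [pyCapitalize, PySem.Chars.lower, upper_lower]
  | cons h t =>
    simp [pyCapitalize, PySem.Chars.lower, lower_idem, Function.comp_def]

-- the loop invariant: B's string is A's joined list followed by the capitalized
-- current word, and B's flag records whether A's current word is empty
theorem main_invariant (l : List Char) :
    ∀ (acc : List (List Char)) (cur out : List Char) (start : Bool),
      out = PySem.Chars.join [] acc ++ pyCapitalize (PySem.Chars.lower cur) →
      (start = true ↔ cur = []) →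
      PySem.Chars.join []
          ((l.foldl aStep (acc, cur)).1
            ++ [pyCapitalize (PySem.Chars.lower (l.foldl aStep (acc, cur)).2)])
        = (l.foldl bStep (out, start)).1 := by
  induction l with
  | nil =>
    intro acc cur out start hout _
    simp [join_nil_eq_flatten, hout]
  | cons i t ih =>
    intro acc cur out start hout hflag
    by_cases h : PySem.Chars.isalpha i = true
    · have ha : aStep (acc, cur) i = (acc, cur ++ [i]) := by
        simp [aStep, h]
      have hb : bStep (out, start) i =
          (out ++ [if start then PySem.Chars.upperChar i else PySem.Chars.lowerChar i],
            false) := by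
        simp [bStep, h]
      simp only [List.foldl_cons, ha, hb]
      apply ih
      · rw [hout, capLower_append, List.append_assoc]
        congr 2
        by_cases hc : cur = []
        · have hs : start = true := hflag.mpr hc
          simp [hs, hc]
        · have hs : start = false := by
            cases start with
            | true => exact absurd (hflag.mp rfl) hc
            | false => rfl
          simp [hs, hc]
      · simp
    · have ha : aStep (acc, cur) i =
          (acc ++ [pyCapitalize (PySem.Chars.lower cur)], []) := by
        simp [aStep, h]
      have hb : bStep (out, start) i = (out, true) := by
        simp [bStep, h]
      simp only [List.foldl_cons, ha, hb]
      apply ih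
      · simp [join_nil_eq_flatten, pyCapitalize, PySem.Chars.lower] at *
        simp [hout]
      · simp

-- ===== VERDICT (by name: the statement is the Claim_ definition above) =====
theorem DifferentCases_spec : Claim_equal_DifferentCases := by
  intro s _
  unfold Spec_DifferentCases DifferentCases DifferentCases_alt
  have h := main_invariant s.toList [] [] [] true rfl (by simp)
  simp only [h]
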